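-- pv_equiv track=rewrite | github.com/avverifier/avverifier | .history/AVVERIFIER/solstatic_20231017113235.py | divide_into_basic_blocks
-- ===== SOURCE A (Python) =====
-- def divide_into_basic_blocks(instruction_list):
--     basic_blocks = []
--     block_start = 0
--
--     for i, instruction in enumerate(instruction_list):
--         is_block_start = False
--
--         # Case 1: First instruction in the list
--         if i == 0:
--             is_block_start = True
--         # Case 2: JUMPDEST instruction
--         elif instruction["opcode"] == "JUMPDEST":
--             is_block_start = True
--         # Case 3: Instruction after JUMPI
--         elif instruction_list[i - 1]["opcode"] in ("JUMPI", "JUMP", "STOP", "RETURN"):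
--             is_block_start = True
--
--         if is_block_start:
--             if i > block_start:
--                 basic_blocks.append(instruction_list[block_start:i])
--                 block_start = i
--
--     # Add the last block
--     if block_start < len(instruction_list):
--         basic_blocks.append(instruction_list[block_start:])
--
--     return basic_blocks
-- ===== SOURCE B (Python) =====
-- def divide_into_basic_blocks(instruction_list):
--     # Peel the leading basic block off the remaining suffix until nothing is left.
--     blocks = []
--     rest = instruction_list
--     while rest:
--         j = 1
--         while j < len(rest):
--             if rest[j]["opcode"] == "JUMPDEST" or \
--                rest[j - 1]["opcode"] in ("JUMPI", "JUMP", "STOP", "RETURN"):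
--                 break
--             j += 1
--         blocks.append(rest[:j])
--         rest = rest[j:]
--     return blocks
-- ===== Notes on version B (the rewrite author's own statement) =====
-- stated objective: alternative
-- what changed: A makes one indexed pass over the whole list carrying (blocks, block_start) state; B repeatedly peels the leading basic block off the remaining suffix (find the first local boundary in the suffix, cut it off, continue on the rest), with no indices into the original list and no block_start state.
-- outside the precondition, e.g. on divide_into_basic_blocks([{'opcode': 'ADD'}, {'x': 'y'}]): A raises KeyError, B raises KeyError
import Mathlib
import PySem

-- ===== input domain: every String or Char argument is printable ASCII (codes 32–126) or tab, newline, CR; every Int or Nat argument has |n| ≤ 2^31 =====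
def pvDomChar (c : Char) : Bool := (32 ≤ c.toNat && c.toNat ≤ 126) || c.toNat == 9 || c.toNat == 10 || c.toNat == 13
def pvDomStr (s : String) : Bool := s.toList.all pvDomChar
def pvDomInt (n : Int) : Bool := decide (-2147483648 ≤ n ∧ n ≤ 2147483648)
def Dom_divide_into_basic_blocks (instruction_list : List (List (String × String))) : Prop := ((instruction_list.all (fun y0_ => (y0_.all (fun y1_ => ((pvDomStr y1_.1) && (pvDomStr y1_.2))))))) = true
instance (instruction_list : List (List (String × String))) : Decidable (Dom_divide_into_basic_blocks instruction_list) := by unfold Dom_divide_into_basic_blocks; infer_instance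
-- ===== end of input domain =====

-- B peels the leading basic block off the remaining suffix until nothing is left, instead of
-- A's single indexed pass carrying (blocks, block_start) state; same return value, different decomposition.

-- ===== PORT A =====
-- A-side helper: the loop body of A's `for i, instruction in enumerate(...)`.
-- dict lookup instr["opcode"] is ported as (instr.lookup "opcode").getD "" — exact
-- (first match) on inputs satisfying Pre_, where the key is always present.
def pvStepA (il : List (List (String × String))) (s : List (List (List (String × String))) × Int) (p : Int × List (String × String)) : List (List (List (String × String))) × Int :=
  let i := p.1
  let instruction := p.2
  let is_block_start : Bool :=
    if i == 0 then true
    else if ((instruction.lookup "opcode").getD "" == "JUMPDEST") then true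
    else
      let prev := ((PySem.List.pyGetD il (i - 1) []).lookup "opcode").getD ""
      if prev == "JUMPI" || prev == "JUMP" || prev == "STOP" || prev == "RETURN" then true
      else false
  if is_block_start && decide (s.2 < i) then
    (s.1 ++ [PySem.List.slice il (some s.2) (some i)], i)
  else s

def divide_into_basic_blocks (instruction_list : List (List (String × String))) : List (List (List (String × String))) :=
  let st := (PySem.List.enumerate instruction_list).foldl (pvStepA instruction_list) ([], 0)
  if st.2 < (instruction_list.length : Int) then
    st.1 ++ [PySem.List.slice instruction_list (some st.2) none]
  else st.1

-- ===== PORT B =====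
-- B-side helper: the "is this a block boundary" test of Source B's inner `while` loop
-- (|| short-circuits exactly like Python's `or`; same "opcode" lookup convention as above).
def pvIsB (il : List (List (String × String))) (i : Int) : Bool :=
  (((PySem.List.pyGetD il i []).lookup "opcode").getD "" == "JUMPDEST")
  || (let prev := ((PySem.List.pyGetD il (i - 1) []).lookup "opcode").getD ""
      prev == "JUMPI" || prev == "JUMP" || prev == "STOP" || prev == "RETURN")

-- Source B's inner `while j < len(rest): if <boundary>: break; j += 1`
def pvFindJ (rest : List (List (String × String))) (j : Nat) : Nat :=
  if j < rest.length then
    if pvIsB rest (j : Int) then j else pvFindJ rest (j + 1)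
  else j
termination_by rest.length - j
decreasing_by omega

-- the port of pvPeel needs this bound for termination, so it lives above the port
lemma pvFindJ_ge (rest : List (List (String × String))) : ∀ (m j : Nat), rest.length ≤ j + m → j ≤ pvFindJ rest j := by
  intro m
  induction m with
  | zero => intro j h; rw [pvFindJ, if_neg (by omega : ¬ j < rest.length)]
  | succ m ih =>
    intro j h
    rw [pvFindJ]
    by_cases hj : j < rest.length
    · rw [if_pos hj]
      by_cases hb : pvIsB rest (j : Int) = true
      · rw [if_pos hb]
      · rw [if_neg hb]
        exact le_trans (by omega) (ih (j + 1) (by omega))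
    · rw [if_neg hj]

-- Source B's outer `while rest:` loop: peel the leading block off the remaining suffix
def pvPeel (rest : List (List (String × String))) : List (List (List (String × String))) :=
  if rest.isEmpty then []
  else
    let j := pvFindJ rest 1
    PySem.List.slice rest none (some (j : Int)) :: pvPeel (PySem.List.slice rest (some (j : Int)) none)
termination_by rest.length
decreasing_by
  have h1 : 1 ≤ pvFindJ rest 1 := pvFindJ_ge rest rest.length 1 (by omega)
  have hne : rest.length ≠ 0 := by
    simpa [List.isEmpty_iff_length_eq_zero] using (by assumption : ¬ rest.isEmpty = true)
  rw [PySem.List.slice_from_natCast]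
  simp only [List.length_drop]
  omega

def divide_into_basic_blocks_alt (instruction_list : List (List (String × String))) : List (List (List (String × String))) :=
  pvPeel instruction_list

-- ===== PRECONDITION & SPEC =====
-- Pre_ excludes exactly the inputs on which A raises KeyError: a missing "opcode" key in any
-- instruction after the first, or in the first instruction when it is actually read
-- (a second instruction exists and is not a JUMPDEST).
def Pre_divide_into_basic_blocks (instruction_list : List (List (String × String))) : Prop :=
  (((instruction_list.drop 1).all (fun instr => (instr.lookup "opcode").isSome)) &&
   (match instruction_list with
    | a :: b :: _ => ((b.lookup "opcode").getD "" == "JUMPDEST") || (a.lookup "opcode").isSome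
    | _ => true)) = true
instance (instruction_list : List (List (String × String))) : Decidable (Pre_divide_into_basic_blocks instruction_list) := by unfold Pre_divide_into_basic_blocks; infer_instance
def pvWitness_divide_into_basic_blocks : (List (List (String × String))) :=
  [[("opcode", "PUSH1")], [("opcode", "JUMP")], [("opcode", "ADD")]]

def Spec_divide_into_basic_blocks (instruction_list : List (List (String × String))) (out : List (List (List (String × String)))) : Prop := out = divide_into_basic_blocks_alt instruction_list
instance (instruction_list : List (List (String × String))) (out : List (List (List (String × String)))) : Decidable (Spec_divide_into_basic_blocks instruction_list out) := by unfold Spec_divide_into_basic_blocks; infer_instance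

-- ===== CLAIM (what is proved, stated in full; the proofs are below) =====
def Claim_equal_divide_into_basic_blocks : Prop := ∀ (instruction_list : List (List (String × String))), Dom_divide_into_basic_blocks instruction_list → Pre_divide_into_basic_blocks instruction_list → Spec_divide_into_basic_blocks instruction_list (divide_into_basic_blocks instruction_list)

-- ===== LEMMAS AND PROOFS =====

-- common recursive characterisation: the blocks still to be produced when the scan is at
-- index k with current block start s
def pvG (il : List (List (String × String))) (k s : Nat) : List (List (List (String × String))) :=
  if k < il.length then
    if pvIsB il (k : Int) ∧ s < k then
      PySem.List.slice il (some (s : Int)) (some (k : Int)) :: pvG il (k + 1) k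
    else pvG il (k + 1) s
  else
    if s < il.length then [PySem.List.slice il (some (s : Int)) (some (il.length : Int))] else []
termination_by il.length - k
decreasing_by all_goals omega

lemma pv_slice_from_eq (il : List (List (String × String))) (s : Nat) :
    PySem.List.slice il (some (s : Int)) none = PySem.List.slice il (some (s : Int)) (some (il.length : Int)) := by
  rw [PySem.List.slice_from_natCast, PySem.List.slice_natCast]
  exact (List.take_of_length_le (by simp)).symm

lemma pvStepA_eq (il : List (List (String × String))) (acc : List (List (List (String × String)))) (sI : Int) (k : Nat) (hk : k < il.length) (hk0 : k ≠ 0) :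
    pvStepA il (acc, sI) ((k : Int), il[k]) =
      if pvIsB il (k : Int) = true ∧ sI < (k : Int) then
        (acc ++ [PySem.List.slice il (some sI) (some (k : Int))], (k : Int))
      else (acc, sI) := by
  have h0 : ((k : Int) == 0) = false := by simp; omega
  have hget : PySem.List.pyGetD il (k : Int) ([] : List (String × String)) = il[k] := by
    rw [PySem.List.pyGetD_natCast]; exact List.getD_eq_getElem il [] hk
  simp only [pvStepA, pvIsB, h0, hget, Bool.false_eq_true, if_false,
    Bool.if_false_right, Bool.decide_eq_true, Bool.and_true, Bool.if_true_left]
  by_cases hc : (((il[k].lookup "opcode").getD "" == "JUMPDEST")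
      || (let prev := ((PySem.List.pyGetD il ((k : Int) - 1) []).lookup "opcode").getD ""
          prev == "JUMPI" || prev == "JUMP" || prev == "STOP" || prev == "RETURN")) = true
  · by_cases h2 : sI < (k : Int) <;> simp [hc, h2]
  · simp [hc]

lemma pv_A_eq_pvG (il : List (List (String × String))) :
    ∀ (m k s : Nat) (acc : List (List (List (String × String)))), il.length ≤ k + m → s ≤ k →
    (let st := (PySem.List.enumerate (il.drop k) (k : Int)).foldl (pvStepA il) (acc, (s : Int))
     if st.2 < (il.length : Int) then st.1 ++ [PySem.List.slice il (some st.2) none] else st.1)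
    = acc ++ pvG il k s := by
  have base : ∀ (k s : Nat) (acc : List (List (List (String × String)))), il.length ≤ k →
      (let st := (PySem.List.enumerate (il.drop k) (k : Int)).foldl (pvStepA il) (acc, (s : Int))
       if st.2 < (il.length : Int) then st.1 ++ [PySem.List.slice il (some st.2) none] else st.1)
      = acc ++ pvG il k s := by
    intro k s acc hk
    rw [List.drop_eq_nil_of_le hk]
    rw [pvG, if_neg (by omega : ¬ k < il.length)]
    simp only [PySem.List.enumerate_nil, List.foldl_nil]
    by_cases hsl : s < il.length
    · rw [if_pos (by exact_mod_cast hsl), if_pos hsl, pv_slice_from_eq]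
    · rw [if_neg (by simp; omega), if_neg hsl, List.append_nil]
  intro m
  induction m with
  | zero =>
    intro k s acc hm hs
    exact base k s acc (by omega)
  | succ m ih =>
    intro k s acc hm hs
    by_cases hlt : k < il.length
    · rw [List.drop_eq_getElem_cons hlt, PySem.List.enumerate_cons, List.foldl_cons]
      have hcast : ((k : Int) + 1) = ((k + 1 : Nat) : Int) := by push_cast; ring
      rw [hcast, pvG, if_pos hlt]
      by_cases hk0 : k = 0
      · subst hk0
        have hs0 : s = 0 := by omega
        subst hs0
        have hstep : pvStepA il (acc, ((0 : Nat) : Int)) (((0 : Nat) : Int), il[0]) = (acc, ((0 : Nat) : Int)) := by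
          simp [pvStepA]
        rw [hstep, if_neg (by omega : ¬ (pvIsB il ((0 : Nat) : Int) = true ∧ 0 < 0))]
        exact ih 1 0 acc (by omega) (by omega)
      · rw [pvStepA_eq il acc (s : Int) k hlt hk0]
        by_cases hc : pvIsB il (k : Int) = true ∧ s < k
        · rw [if_pos (show pvIsB il (k : Int) = true ∧ (s : Int) < (k : Int) from ⟨hc.1, by exact_mod_cast hc.2⟩)]
          rw [if_pos hc]
          rw [ih (k + 1) k (acc ++ [PySem.List.slice il (some (s : Int)) (some (k : Int))]) (by omega) (by omega)]
          rw [List.append_assoc]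
          rfl
        · rw [if_neg (show ¬ (pvIsB il (k : Int) = true ∧ (s : Int) < (k : Int)) from
              fun h => hc ⟨h.1, by exact_mod_cast h.2⟩)]
          rw [if_neg hc]
          exact ih (k + 1) s acc (by omega) (by omega)
    · exact base k s acc (by omega)

-- the local boundary test on a suffix equals the global one (for j ≥ 1)
lemma pvIsB_drop (il : List (List (String × String))) (s j : Nat) (hj : 1 ≤ j) :
    pvIsB (il.drop s) (j : Int) = pvIsB il ((s + j : Nat) : Int) := by
  have hgd : ∀ (k : Nat), PySem.List.pyGetD (il.drop s) ((k : Nat) : Int) ([] : List (String × String))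
      = PySem.List.pyGetD il ((s + k : Nat) : Int) ([] : List (String × String)) := by
    intro k
    rw [PySem.List.pyGetD_natCast, PySem.List.pyGetD_natCast,
        List.getD_eq_getElem?_getD, List.getD_eq_getElem?_getD, List.getElem?_drop]
  have h1 : ((j : Int) - 1) = (((j - 1 : Nat)) : Int) := by omega
  have h2 : (((s + j : Nat) : Int) - 1) = (((s + (j - 1) : Nat)) : Int) := by omega
  unfold pvIsB
  rw [h1, h2, hgd j, hgd (j - 1)]

lemma pvFindJ_le (rest : List (List (String × String))) : ∀ (m j : Nat), rest.length ≤ j + m → j ≤ rest.length → pvFindJ rest j ≤ rest.length := by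
  intro m
  induction m with
  | zero => intro j h hj; rw [pvFindJ, if_neg (by omega : ¬ j < rest.length)]; omega
  | succ m ih =>
    intro j h hj
    rw [pvFindJ]
    by_cases hlt : j < rest.length
    · rw [if_pos hlt]
      by_cases hb : pvIsB rest (j : Int) = true
      · rw [if_pos hb]; omega
      · rw [if_neg hb]; exact ih (j + 1) (by omega) (by omega)
    · rw [if_neg hlt]; omega

-- the first boundary found in the suffix matches pvG's scan from the same point
lemma pv_find_pvG (il : List (List (String × String))) :
    ∀ (m s j : Nat), 1 ≤ j → il.length ≤ s + j + m → s + j ≤ il.length →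
    pvG il (s + j) s =
      PySem.List.slice il (some (s : Int)) (some ((s + pvFindJ (il.drop s) j : Nat) : Int)) ::
        (if s + pvFindJ (il.drop s) j < il.length then
          pvG il (s + pvFindJ (il.drop s) j + 1) (s + pvFindJ (il.drop s) j) else []) := by
  have base : ∀ (s j : Nat), 1 ≤ j → s + j = il.length →
      pvG il (s + j) s =
        PySem.List.slice il (some (s : Int)) (some ((s + pvFindJ (il.drop s) j : Nat) : Int)) ::
          (if s + pvFindJ (il.drop s) j < il.length then
            pvG il (s + pvFindJ (il.drop s) j + 1) (s + pvFindJ (il.drop s) j) else []) := by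
    intro s j hj heq
    have hJ : pvFindJ (il.drop s) j = j := by
      rw [pvFindJ, if_neg (by simp only [List.length_drop]; omega)]
    rw [hJ, heq, pvG, if_neg (by omega : ¬ il.length < il.length),
        if_pos (by omega : s < il.length), if_neg (by omega : ¬ il.length < il.length)]
  intro m
  induction m with
  | zero =>
    intro s j hj hm hle
    exact base s j hj (by omega)
  | succ m ih =>
    intro s j hj hm hle
    by_cases heq : s + j = il.length
    · exact base s j hj heq
    · have hlt : s + j < il.length := by omega
      have hJstep : pvFindJ (il.drop s) j =
          (if pvIsB (il.drop s) (j : Int) then j else pvFindJ (il.drop s) (j + 1)) := by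
        rw [pvFindJ, if_pos (by simp only [List.length_drop]; omega)]
      rw [pvIsB_drop il s j hj] at hJstep
      by_cases hb : pvIsB il ((s + j : Nat) : Int) = true
      · rw [if_pos hb] at hJstep
        rw [hJstep]
        rw [pvG, if_pos hlt, if_pos ⟨hb, by omega⟩, if_pos hlt]
      · rw [if_neg hb] at hJstep
        rw [hJstep]
        rw [pvG, if_pos hlt, if_neg (fun h => hb h.1)]
        have := ih s (j + 1) (by omega) (by omega) (by omega)
        rw [show s + (j + 1) = s + j + 1 by omega] at this
        exact this

lemma pvPeel_nil : pvPeel [] = [] := by rw [pvPeel]; rfl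

-- peeling the suffix starting at s produces pvG's blocks from scan position s+1
lemma pv_peel_eq_pvG (il : List (List (String × String))) :
    ∀ (m s : Nat), il.length ≤ s + m → s < il.length → pvPeel (il.drop s) = pvG il (s + 1) s := by
  intro m
  induction m with
  | zero => intro s hm hs; omega
  | succ m ih =>
    intro s hm hs
    have hrne : ((il.drop s).isEmpty) = false := by
      rw [List.isEmpty_eq_false_iff_exists_mem]
      exact ⟨il[s], by rw [List.mem_iff_getElem]; exact ⟨0, by simp; omega, by simp [List.getElem_drop]⟩⟩
    rw [pvPeel, hrne]
    simp only [Bool.false_eq_true, if_false]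
    have hJ1 : 1 ≤ pvFindJ (il.drop s) 1 := pvFindJ_ge (il.drop s) (il.drop s).length 1 (by omega)
    have hJle : s + pvFindJ (il.drop s) 1 ≤ il.length := by
      have := pvFindJ_le (il.drop s) (il.drop s).length 1 (by omega)
        (by simp only [List.length_drop]; omega)
      simp only [List.length_drop] at this
      omega
    have hfind := pv_find_pvG il (m + 1) s 1 (by omega) (by omega) (by omega)
    rw [hfind]
    have hhead : PySem.List.slice (il.drop s) none (some ((pvFindJ (il.drop s) 1 : Nat) : Int))
        = PySem.List.slice il (some (s : Int)) (some ((s + pvFindJ (il.drop s) 1 : Nat) : Int)) := by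
      rw [PySem.List.slice_to_natCast, PySem.List.slice_natCast,
          show s + pvFindJ (il.drop s) 1 - s = pvFindJ (il.drop s) 1 by omega]
    have htail : PySem.List.slice (il.drop s) (some ((pvFindJ (il.drop s) 1 : Nat) : Int)) none
        = il.drop (s + pvFindJ (il.drop s) 1) := by
      rw [PySem.List.slice_from_natCast, List.drop_drop]
    rw [hhead, htail]
    by_cases hlt : s + pvFindJ (il.drop s) 1 < il.length
    · rw [if_pos hlt, ih (s + pvFindJ (il.drop s) 1) (by omega) hlt]
    · rw [if_neg hlt]
      have : s + pvFindJ (il.drop s) 1 = il.length := by omega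
      rw [this, List.drop_length, pvPeel_nil]

-- ===== VERDICT (by name: the statement is the Claim_ definition above) =====
theorem divide_into_basic_blocks_spec : Claim_equal_divide_into_basic_blocks := by
  intro il _ _
  show divide_into_basic_blocks il = divide_into_basic_blocks_alt il
  by_cases hnil : il = []
  · subst hnil
    rw [divide_into_basic_blocks_alt, pvPeel_nil]
    rfl
  · have hlen : 0 < il.length := List.length_pos_of_ne_nil hnil
    have hA := pv_A_eq_pvG il il.length 0 0 [] (by omega) (by omega)
    simp only [List.drop_zero, Nat.cast_zero, List.nil_append] at hA
    have hG : pvG il 0 0 = pvG il 1 0 := by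
      rw [pvG, if_pos hlen, if_neg (by omega : ¬ (pvIsB il ((0 : Nat) : Int) = true ∧ 0 < 0))]
    have hB := pv_peel_eq_pvG il il.length 0 (by omega) hlen
    simp only [List.drop_zero] at hB
    rw [divide_into_basic_blocks] at *
    rw [hA, hG, divide_into_basic_blocks_alt, hB]
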